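-- pv_equiv track=rewrite | github.com/blocksecteam/hookscan | uniscan/components/value.py | _get_source_code
-- ===== SOURCE A (Python) =====
-- def _get_source_code(comment) -> str:
--     tmp_items = comment.split('"')
--     result = ""
--     for i, item in enumerate(tmp_items):
--         if i == 0:
--             continue
--         else:
--             result += item
--     return result
-- ===== SOURCE B (Python) =====
-- def _get_source_code(comment) -> str:
--     idx = comment.find('"')
--     if idx == -1:
--         return ""
--     return comment[idx + 1:].replace('"', '')
-- ===== Notes on version B (the rewrite author's own statement) =====
-- stated objective: simpler
-- what changed: Instead of splitting the whole string on '"' and concatenating every part after the first, B finds the index of the first quote, slices the suffix after it and deletes remaining quotes with one replace.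
import Mathlib
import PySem

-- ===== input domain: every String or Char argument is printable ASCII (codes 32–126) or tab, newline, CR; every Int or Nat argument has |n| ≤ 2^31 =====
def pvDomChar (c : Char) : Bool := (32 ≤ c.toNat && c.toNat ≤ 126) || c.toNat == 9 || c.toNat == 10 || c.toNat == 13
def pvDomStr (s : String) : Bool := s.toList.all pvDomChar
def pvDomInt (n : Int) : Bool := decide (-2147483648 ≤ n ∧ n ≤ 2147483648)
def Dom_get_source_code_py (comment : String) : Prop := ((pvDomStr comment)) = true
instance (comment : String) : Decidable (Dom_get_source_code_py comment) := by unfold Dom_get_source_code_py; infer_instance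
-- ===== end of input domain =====

-- B replaces split-on-quote-and-concatenate by find-first-quote, slice the suffix, delete remaining quotes (simpler decomposition, same cost).

-- ===== PORT A =====
def get_source_code_py (comment : String) : String :=
  let tmp_items := (PySem.Str.split? comment "\"").getD []   -- sep is the non-empty literal '"', so split? is always `some`
  (PySem.List.enumerate tmp_items).foldl
    (fun result (p : Int × String) => if p.1 == 0 then result else result ++ p.2) ""

-- ===== PORT B =====
def get_source_code_py_alt (comment : String) : String :=
  let idx := PySem.Str.find comment "\""
  if idx == -1 then ""
  else PySem.Str.replace (PySem.Str.slice comment (some (idx + 1)) none) "\"" ""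

-- ===== PRECONDITION & SPEC =====
def Spec_get_source_code_py (comment : String) (out : String) : Prop := out = get_source_code_py_alt comment
instance (comment : String) (out : String) : Decidable (Spec_get_source_code_py comment out) := by unfold Spec_get_source_code_py; infer_instance

-- ===== CLAIM (what is proved, stated in full; the proofs are below) =====
def Claim_equal_get_source_code_py : Prop := ∀ (comment : String), Dom_get_source_code_py comment → Spec_get_source_code_py comment (get_source_code_py comment)

-- ===== LEMMAS AND PROOFS =====

-- proof-only model of splitting a char list on '"'
def splitQ : List Char → List (List Char)
  | [] => [[]]
  | c :: t => if c = '"' then [] :: splitQ t else (splitQ t).modifyHead (c :: ·)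

theorem modifyHead_triv (l : List (List Char)) : List.modifyHead (fun x => x) l = l := by
  cases l <;> simp

theorem splitQ_ne_nil (l : List Char) : splitQ l ≠ [] := by
  cases l with
  | nil => simp [splitQ]
  | cons c t =>
    simp only [splitQ]
    split
    · simp
    · cases h : splitQ t with
      | nil => exact absurd h (splitQ_ne_nil t)
      | cons a b => simp

theorem prefix_quote (c : Char) (rest : List Char) :
    List.isPrefixOf ['"'] (c :: rest) = (c == '"') := by
  by_cases hc : c = '"'
  · subst hc; simp [List.isPrefixOf]
  · simp [List.isPrefixOf, hc, Ne.symm hc]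

theorem splitOn_go_eq (fuel : Nat) (l cur : List Char) (acc : List (List Char))
    (h : l.length ≤ fuel) :
    PySem.Chars.splitOn.go ['"'] fuel l cur acc
      = acc.reverse ++ (splitQ l).modifyHead (cur.reverse ++ ·) := by
  induction fuel generalizing l cur acc with
  | zero =>
    have : l = [] := List.eq_nil_of_length_eq_zero (Nat.le_zero.mp h)
    subst this
    simp [PySem.Chars.splitOn.go, splitQ]
  | succ n ih =>
    cases l with
    | nil => simp [PySem.Chars.splitOn.go, splitQ]
    | cons c rest =>
      have hlen : rest.length ≤ n := by simp at h; omega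
      by_cases hc : c = '"'
      · subst hc
        simp only [PySem.Chars.splitOn.go, prefix_quote, beq_self_eq_true, if_true,
          List.length_cons, List.drop_succ_cons, List.length_nil, List.drop_zero]
        rw [ih rest [] _ hlen]
        simp [splitQ, modifyHead_triv]
      · have hb : (c == '"') = false := by simp [hc]
        simp only [PySem.Chars.splitOn.go, prefix_quote, hb, Bool.false_eq_true, if_false]
        rw [ih rest (c :: cur) acc hlen]
        obtain ⟨a, b, hab⟩ := List.exists_cons_of_ne_nil (splitQ_ne_nil rest)
        simp [splitQ, hc, hab]

theorem chars_splitOn_eq (cs : List Char) :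
    PySem.Chars.splitOn cs ['"'] = splitQ cs := by
  have h1 := splitOn_go_eq (cs.length + 1) cs [] [] (by omega)
  simp only [List.reverse_nil, List.nil_append] at h1
  rw [PySem.Chars.splitOn, h1]
  exact modifyHead_triv _

theorem replace_go_eq (fuel : Nat) (l acc : List Char) (h : l.length ≤ fuel) :
    PySem.Chars.replace.go ['"'] [] fuel l acc
      = acc.reverse ++ l.filter (fun c => c ≠ '"') := by
  induction fuel generalizing l acc with
  | zero =>
    have : l = [] := List.eq_nil_of_length_eq_zero (Nat.le_zero.mp h)
    subst this
    simp [PySem.Chars.replace.go]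
  | succ n ih =>
    cases l with
    | nil => simp [PySem.Chars.replace.go]
    | cons c rest =>
      have hlen : rest.length ≤ n := by simp at h; omega
      by_cases hc : c = '"'
      · subst hc
        simp only [PySem.Chars.replace.go, prefix_quote, beq_self_eq_true, if_true,
          List.length_cons, List.drop_succ_cons, List.length_nil, List.drop_zero,
          List.reverse_nil, List.nil_append]
        rw [ih rest _ hlen]
        simp
      · have hb : (c == '"') = false := by simp [hc]
        simp only [PySem.Chars.replace.go, prefix_quote, hb, Bool.false_eq_true, if_false]
        rw [ih rest (c :: acc) hlen]
        simp [hc]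

theorem chars_replace_eq (cs : List Char) :
    PySem.Chars.replace cs ['"'] [] = cs.filter (fun c => c ≠ '"') := by
  simpa [PySem.Chars.replace] using replace_go_eq cs.length cs [] (le_refl _)

theorem find_go_eq (l : List Char) (k : Nat) :
    PySem.Chars.find.go ['"'] l k
      = if '"' ∈ l then ((k + l.idxOf '"' : Nat) : Int) else -1 := by
  induction l generalizing k with
  | nil => simp [PySem.Chars.find.go]
  | cons c rest ih =>
    by_cases hc : c = '"'
    · subst hc
      simp [PySem.Chars.find.go, prefix_quote, List.idxOf_cons]
    · have hb : (c == '"') = false := by simp [hc]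
      have hq : ('"' : Char) ≠ c := Ne.symm hc
      simp only [PySem.Chars.find.go, prefix_quote, hb, Bool.false_eq_true, if_false,
        ih (k + 1)]
      by_cases hm : '"' ∈ rest
      · have hmem : '"' ∈ c :: rest := List.mem_cons_of_mem _ hm
        rw [if_pos hm, if_pos hmem]
        have : (c :: rest).idxOf '"' = rest.idxOf '"' + 1 := by
          simp [List.idxOf_cons, hb]
        rw [this]
        push_cast
        ring
      · have hmem : '"' ∉ c :: rest := by
          simp [List.mem_cons, hq, hm]
        rw [if_neg hm, if_neg hmem]

theorem flatten_splitQ (l : List Char) :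
    (splitQ l).flatten = l.filter (fun c => c ≠ '"') := by
  induction l with
  | nil => simp [splitQ]
  | cons c t ih =>
    by_cases hc : c = '"'
    · subst hc
      simp [splitQ, ih]
    · obtain ⟨a, b, hab⟩ := List.exists_cons_of_ne_nil (splitQ_ne_nil t)
      rw [hab] at ih
      simp only [List.flatten_cons] at ih
      simp only [splitQ, if_neg hc, hab, List.modifyHead_cons, List.flatten_cons,
        List.cons_append, List.filter_cons]
      simp [hc, ih]

theorem tail_flatten_splitQ (l : List Char) :
    (splitQ l).tail.flatten
      = if '"' ∈ l then (l.drop (l.idxOf '"' + 1)).filter (fun c => c ≠ '"') else [] := by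
  induction l with
  | nil => simp [splitQ]
  | cons c t ih =>
    by_cases hc : c = '"'
    · subst hc
      simp [splitQ, List.idxOf_cons, flatten_splitQ]
    · have hb : (c == '"') = false := by simp [hc]
      have hq : ('"' : Char) ≠ c := Ne.symm hc
      obtain ⟨a, b, hab⟩ := List.exists_cons_of_ne_nil (splitQ_ne_nil t)
      rw [hab] at ih
      simp only [List.tail_cons] at ih
      simp only [splitQ, if_neg hc, hab, List.modifyHead_cons, List.tail_cons, ih]
      by_cases hm : '"' ∈ t
      · have hmem : '"' ∈ c :: t := List.mem_cons_of_mem _ hm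
        rw [if_pos hm, if_pos hmem]
        have : (c :: t).idxOf '"' = t.idxOf '"' + 1 := by
          simp [List.idxOf_cons, hb]
        rw [this, List.drop_succ_cons]
      · have hmem : '"' ∉ c :: t := by simp [List.mem_cons, hq, hm]
        rw [if_neg hm, if_neg hmem]

theorem fold_enum_pos (ts : List String) (s : Int) (acc : String) (hs : 1 ≤ s) :
    (PySem.List.enumerate ts s).foldl
        (fun result (p : Int × String) => if p.1 == 0 then result else result ++ p.2) acc
      = ts.foldl (· ++ ·) acc := by
  induction ts generalizing s acc with
  | nil => simp [PySem.List.enumerate]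
  | cons t ts ih =>
    rw [PySem.List.enumerate_cons]
    have hz : (s == 0) = false := by simp; omega
    simp only [List.foldl_cons, hz, Bool.false_eq_true, if_false]
    exact ih (s + 1) (acc ++ t) (by omega)

theorem foldl_append_toList (ts : List String) (acc : String) :
    (ts.foldl (· ++ ·) acc).toList = acc.toList ++ (ts.map String.toList).flatten := by
  induction ts generalizing acc with
  | nil => simp
  | cons t ts ih => simp [ih]

theorem quote_toList : ("\"" : String).toList = ['"'] := rfl

theorem portA_toList (comment : String) :
    (get_source_code_py comment).toList = (splitQ comment.toList).tail.flatten := by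
  have hsplit : PySem.Str.split? comment "\"" =
      some ((splitQ comment.toList).map String.ofList) := by
    simp [PySem.Str.split?, PySem.Chars.split?, quote_toList, chars_splitOn_eq]
  simp only [get_source_code_py, hsplit, Option.getD_some]
  obtain ⟨h, tl, hht⟩ := List.exists_cons_of_ne_nil (splitQ_ne_nil comment.toList)
  rw [hht]
  simp only [List.map_cons, PySem.List.enumerate, PySem.List.enumerate_cons,
    List.foldl_cons, beq_self_eq_true, if_true]
  rw [fold_enum_pos _ (0 + 1) "" (by omega), foldl_append_toList]
  simp [List.map_map, Function.comp_def, String.toList_ofList]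

theorem portB_toList (comment : String) :
    (get_source_code_py_alt comment).toList
      = if '"' ∈ comment.toList
          then (comment.toList.drop (comment.toList.idxOf '"' + 1)).filter (fun c => c ≠ '"')
          else [] := by
  have hfind : PySem.Chars.find comment.toList ['"'] =
      if '"' ∈ comment.toList then ((comment.toList.idxOf '"' : Nat) : Int) else -1 := by
    rw [PySem.Chars.find]
    simpa using find_go_eq comment.toList 0
  by_cases hm : '"' ∈ comment.toList
  · have hne : (((comment.toList.idxOf '"' : Nat) : Int) == -1) = false := by
      rw [beq_eq_false_iff_ne]; omega
    simp only [get_source_code_py_alt, PySem.Str.find_eq, quote_toList, hfind,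
      if_pos hm, hne, Bool.false_eq_true, if_false]
    rw [PySem.Str.toList_replace, quote_toList]
    have hempty : ("" : String).toList = [] := rfl
    rw [hempty, PySem.Str.toList_slice, PySem.Chars.slice_eq_listSlice]
    rw [show ((comment.toList.idxOf '"' : Nat) : Int) + 1
          = ((comment.toList.idxOf '"' + 1 : Nat) : Int) by push_cast; ring]
    rw [PySem.List.slice_from comment.toList (by positivity)]
    rw [chars_replace_eq]
    simp [hm]
  · simp only [get_source_code_py_alt, PySem.Str.find_eq, quote_toList, hfind, if_neg hm]
    simp [hm]

-- ===== VERDICT (by name: the statement is the Claim_ definition above) =====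
theorem get_source_code_py_spec : Claim_equal_get_source_code_py := by
  intro comment _
  unfold Spec_get_source_code_py
  have h : (get_source_code_py comment).toList = (get_source_code_py_alt comment).toList := by
    rw [portA_toList, portB_toList, tail_flatten_splitQ]
  exact String.toList_injective h
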